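-- pv_equiv track=rewrite | github.com/uwescience/raco | raco/backends/spark/pyspark_csv.py | reduceTypes
-- ===== SOURCE A (Python) =====
-- def reduceTypes(a, b):
--     """Reduces column types among rows to find common denominator"""
--     type_order = {'string': 0, 'date': 1, 'double': 2, 'int': 3, 'none': 4}
--     reduce_map = {'int': {0: 'string', 1: 'string', 2: 'double'},
--                   'double': {0: 'string', 1: 'string'},
--                   'date': {0: 'string'}}
--     d = a
--     for col, a_type in enumerate(a):
--         # a_type = a[col]
--         b_type = b[col]
--         if a_type == 'none':
--             d[col] = b_type
--         elif b_type == 'none':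
--             d[col] = a_type
--         else:
--             order_a = type_order[a_type]
--             order_b = type_order[b_type]
--             if order_a == order_b:
--                 d[col] = a_type
--             elif order_a > order_b:
--                 d[col] = reduce_map[a_type][order_b]
--             elif order_a < order_b:
--                 d[col] = reduce_map[b_type][order_a]
--     return d
-- ===== SOURCE B (Python) =====
-- _BIT = {'none': 0, 'string': 1, 'date': 2, 'double': 4, 'int': 8}
-- _TYPE_OF_MASK = {1: 'string', 2: 'date', 4: 'double', 8: 'int', 12: 'double'}
--
--
-- def _meet(x, y):
--     # 'none' is the identity of the merge
--     if x == 'none':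
--         return y
--     if y == 'none':
--         return x
--     # union of the two one-bit encodings; every mixed mask other than
--     # int|double (= 12) collapses to 'string'
--     return _TYPE_OF_MASK.get(_BIT[x] | _BIT[y], 'string')
--
--
-- def _merged(xs, ys):
--     if not xs:
--         return []
--     return [_meet(xs[0], ys[0])] + _merged(xs[1:], ys[1:])
--
--
-- def reduceTypes(a, b):
--     """Reduces column types among rows to find common denominator"""
--     a[:] = _merged(a, b)
--     return a
-- ===== Notes on version B (the rewrite author's own statement) =====
-- stated objective: alternative
-- what changed: Encodes each type as a single bit and merges a pair by bitwise OR of the encodings decoded through a mask table (only int|double stays non-string), replacing A's numeric rank comparison with nested reduce_map tables; the result list is built by structural recursion on the lists instead of A's in-place index loop.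
import Mathlib
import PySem

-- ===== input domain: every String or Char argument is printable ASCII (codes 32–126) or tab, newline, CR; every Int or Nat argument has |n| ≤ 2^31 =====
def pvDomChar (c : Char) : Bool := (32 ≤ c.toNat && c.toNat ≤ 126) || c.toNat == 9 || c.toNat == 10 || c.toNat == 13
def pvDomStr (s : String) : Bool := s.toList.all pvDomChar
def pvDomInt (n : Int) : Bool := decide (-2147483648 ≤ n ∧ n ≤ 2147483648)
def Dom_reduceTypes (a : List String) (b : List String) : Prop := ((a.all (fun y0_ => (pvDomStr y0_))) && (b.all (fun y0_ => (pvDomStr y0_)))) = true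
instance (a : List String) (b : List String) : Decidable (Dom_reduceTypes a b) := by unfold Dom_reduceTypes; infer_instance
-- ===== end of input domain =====

-- B merges a pair of types by bitwise-OR of one-bit encodings decoded through a mask table
-- (instead of A's rank comparison with nested reduce_map tables) and builds the result by
-- structural recursion instead of A's in-place index loop; objective: alternative.
-- Note: A mutates its first argument in place (d = a) and B does the same via a[:] = …;
-- the equivalence proved here is about the return value.

-- ===== PORT A =====
def pvTypeOrder : PySem.Dict String Int :=
  PySem.Dict.ofList [("string", 0), ("date", 1), ("double", 2), ("int", 3), ("none", 4)]

def pvReduceMap : PySem.Dict String (PySem.Dict Int String) :=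
  PySem.Dict.ofList
    [("int", PySem.Dict.ofList [(0, "string"), (1, "string"), (2, "double")]),
     ("double", PySem.Dict.ofList [(0, "string"), (1, "string")]),
     ("date", PySem.Dict.ofList [(0, "string")])]

-- the body of A's for-loop (col = ca.1 ≥ 0 always, so .toNat is exact here);
-- getD "" / getD 0 stand for IndexError / KeyError, excluded by Pre_
def pvStepA (b : List String) (d : List String) (ca : Int × String) : List String :=
  let col := ca.1
  let a_type := ca.2
  let b_type := (PySem.List.pyGet? b col).getD ""
  if a_type == "none" then d.set col.toNat b_type
  else if b_type == "none" then d.set col.toNat a_type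
  else
    let order_a := (pvTypeOrder.get? a_type).getD 0
    let order_b := (pvTypeOrder.get? b_type).getD 0
    if order_a == order_b then d.set col.toNat a_type
    else if order_a > order_b then
      d.set col.toNat ((((pvReduceMap.get? a_type).getD PySem.Dict.empty).get? order_b).getD "")
    else if order_a < order_b then
      d.set col.toNat ((((pvReduceMap.get? b_type).getD PySem.Dict.empty).get? order_a).getD "")
    else d

def reduceTypes (a : List String) (b : List String) : List String :=
  (PySem.List.enumerate a 0).foldl (pvStepA b) a

-- ===== PORT B =====
def pvBit : PySem.Dict String Int :=
  PySem.Dict.ofList [("none", 0), ("string", 1), ("date", 2), ("double", 4), ("int", 8)]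

def pvTypeOfMask : PySem.Dict Int String :=
  PySem.Dict.ofList [(1, "string"), (2, "date"), (4, "double"), (8, "int"), (12, "double")]

-- _meet; getD 0 stands for the KeyError on unrecognized non-'none' types, excluded by Pre_;
-- `|` on the (nonnegative) bit codes is Int.lor
def pvMeet (x : String) (y : String) : String :=
  if x == "none" then y
  else if y == "none" then x
  else (pvTypeOfMask.get? (Int.lor ((pvBit.get? x).getD 0) ((pvBit.get? y).getD 0))).getD "string"

-- _merged; ys[0] → pyGet? (getD "" = IndexError, excluded by Pre_), ys[1:] → drop 1
def pvMerged : List String → List String → List String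
  | [], _ => []
  | x :: xs, ys => pvMeet x ((PySem.List.pyGet? ys 0).getD "") :: pvMerged xs (ys.drop 1)

def reduceTypes_alt (a : List String) (b : List String) : List String :=
  pvMerged a b

-- ===== PRECONDITION & SPEC =====
-- a pair of column types on which A's loop body returns normally
def pvOkPair (p : String × String) : Bool :=
  p.1 == "none" || p.2 == "none" ||
    (["string", "date", "double", "int"].contains p.1 &&
     ["string", "date", "double", "int"].contains p.2)

-- exactly the inputs where Python A returns: b has at least as many columns as a
-- (else IndexError) and every aligned pair of non-'none' types is a recognized
-- type-name pair (else KeyError in type_order)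
def Pre_reduceTypes (a : List String) (b : List String) : Prop :=
  a.length ≤ b.length ∧ (a.zip b).all pvOkPair = true

instance (a : List String) (b : List String) : Decidable (Pre_reduceTypes a b) := by
  unfold Pre_reduceTypes; infer_instance

def pvWitness_reduceTypes : List String × List String :=
  (["int", "none", "date"], ["double", "string", "date"])

def Spec_reduceTypes (a : List String) (b : List String) (out : List String) : Prop := out = reduceTypes_alt a b
instance (a : List String) (b : List String) (out : List String) : Decidable (Spec_reduceTypes a b out) := by unfold Spec_reduceTypes; infer_instance

-- ===== CLAIM (what is proved, stated in full; the proofs are below) =====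
def Claim_equal_reduceTypes : Prop := ∀ (a : List String) (b : List String), Dom_reduceTypes a b → Pre_reduceTypes a b → Spec_reduceTypes a b (reduceTypes a b)

-- ===== LEMMAS AND PROOFS =====

-- setting at the junction index of an append
lemma pv_set_len_append {α : Type} (done : List α) (x v : α) (suf : List α) :
    (done ++ x :: suf).set done.length v = done ++ v :: suf := by
  induction done with
  | nil => rfl
  | cons h t ih => simp [ih]

-- A's rank-and-reduce_map if-chain agrees with B's bit-OR meet on recognized pairs
lemma pv_chain_eq (d : List String) (n : Nat) (t1 t2 : String)
    (h1 : t1 ∈ ["string", "date", "double", "int"])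
    (h2 : t2 ∈ ["string", "date", "double", "int"]) :
    (if ((pvTypeOrder.get? t1).getD 0) == ((pvTypeOrder.get? t2).getD 0) then d.set n t1
     else if ((pvTypeOrder.get? t1).getD 0) > ((pvTypeOrder.get? t2).getD 0) then
       d.set n ((((pvReduceMap.get? t1).getD PySem.Dict.empty).get? ((pvTypeOrder.get? t2).getD 0)).getD "")
     else if ((pvTypeOrder.get? t1).getD 0) < ((pvTypeOrder.get? t2).getD 0) then
       d.set n ((((pvReduceMap.get? t2).getD PySem.Dict.empty).get? ((pvTypeOrder.get? t1).getD 0)).getD "")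
     else d)
      = d.set n (pvMeet t1 t2) := by
  fin_cases h1 <;> fin_cases h2 <;> rfl

-- one loop step on an ok pair rewrites the column to pvMeet of the pair
lemma pv_stepA_eq (b done suf : List String) (t : String)
    (hn : done.length < b.length)
    (hok : pvOkPair (t, b[done.length]) = true) :
    pvStepA b (done ++ t :: suf) ((done.length : Int), t)
      = done ++ pvMeet t b[done.length] :: suf := by
  have hget : PySem.List.pyGet? b ((done.length : Nat) : Int) = some b[done.length] := by
    rw [PySem.List.pyGet?_natCast]; simp [hn]
  unfold pvStepA
  simp only [hget, Option.getD_some, Int.toNat_natCast]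
  by_cases h1 : t = "none"
  · simp [h1, pvMeet]
  · by_cases h2 : b[done.length] = "none"
    · simp [h1, h2, pvMeet]
    · have e1 : (t == "none") = false := by simp [h1]
      have e2 : (b[done.length] == "none") = false := by simp [h2]
      simp only [pvOkPair, e1, e2, Bool.false_or, Bool.and_eq_true,
        List.contains_eq_mem, decide_eq_true_eq] at hok
      simp only [e1, e2, Bool.false_eq_true, if_false]
      rw [pv_chain_eq _ _ _ _ hok.1 hok.2, pv_set_len_append]

-- loop invariant: the processed prefix `done` is final, the suffix is rewritten columnwise
lemma pv_loopA (b : List String) (suf : List String) : ∀ (done : List String),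
    done.length + suf.length ≤ b.length →
    (∀ p ∈ suf.zip (b.drop done.length), pvOkPair p = true) →
    (PySem.List.enumerate suf (done.length : Int)).foldl (pvStepA b) (done ++ suf)
      = done ++ (suf.zip (b.drop done.length)).map (fun p => pvMeet p.1 p.2) := by
  induction suf with
  | nil => intro done _ _; simp [PySem.List.enumerate_nil]
  | cons t suf ih =>
    intro done hlen hok
    have hn : done.length < b.length := by simp at hlen; omega
    have hdrop : b.drop done.length = b[done.length] :: b.drop (done.length + 1) :=
      List.drop_eq_getElem_cons hn
    rw [hdrop] at hok
    simp only [List.zip_cons_cons] at hok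
    rw [PySem.List.enumerate_cons, List.foldl_cons,
      pv_stepA_eq b done suf t hn (hok _ (List.mem_cons_self ..))]
    have hlen' : (done ++ [pvMeet t b[done.length]]).length = done.length + 1 := by simp
    have hcast : (done.length : Int) + 1 = ((done ++ [pvMeet t b[done.length]]).length : Int) := by
      simp
    rw [hcast, show done ++ pvMeet t b[done.length] :: suf
        = (done ++ [pvMeet t b[done.length]]) ++ suf by simp,
      ih (done ++ [pvMeet t b[done.length]]) (by simp at hlen ⊢; omega)
        (by rw [hlen']; intro p hp; exact hok p (List.mem_cons_of_mem _ hp))]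
    rw [hlen', hdrop, List.zip_cons_cons, List.map_cons]
    simp

-- B's recursion is the columnwise map when b is long enough
lemma pv_merged_eq : ∀ (a b : List String), a.length ≤ b.length →
    pvMerged a b = (a.zip b).map (fun p => pvMeet p.1 p.2) := by
  intro a
  induction a with
  | nil => intro b _; simp [pvMerged]
  | cons x xs ih =>
    intro b hlen
    cases b with
    | nil => simp at hlen
    | cons y ys =>
      have h1 : pvMerged (x :: xs) (y :: ys) = pvMeet x y :: pvMerged xs ys := by
        simp [pvMerged, PySem.List.pyGet?, PySem.List.pyIdx?]
      rw [h1, ih ys (by simp at hlen; omega), List.zip_cons_cons, List.map_cons]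

-- ===== VERDICT (by name: the statement is the Claim_ definition above) =====
theorem reduceTypes_spec : Claim_equal_reduceTypes := by
  intro a b _ hpre
  obtain ⟨hlen, hall⟩ := hpre
  show reduceTypes a b = reduceTypes_alt a b
  unfold reduceTypes reduceTypes_alt
  rw [pv_merged_eq a b hlen]
  have h0 := pv_loopA b a [] (by simp only [List.length_nil]; omega)
    (by intro p hp; simp only [List.length_nil, List.drop_zero] at hp
        exact List.all_eq_true.mp hall p hp)
  simpa using h0
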